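-- pv_equiv track=rewrite | github.com/tiffanygassmann/BIMM185 | protein_compare.py | compare_proteins
-- ===== SOURCE A (Python) =====
-- def compare_proteins(proteins):
--
--         best_matches = []
--         max_length = 0
--         max_protein = ''
--
--         for protein in proteins.keys():
--             #proteins[key] list of tuples, second item of tuple
--             res = max(proteins[protein], key = lambda x:x[1])
--             best_matches.append((protein,res))
--
--             length = len(proteins[protein])
--
--             if length > max_length:
--                 max_length = length
--                 max_protein = protein
--
--         return best_matches, max_protein, max_length
-- ===== SOURCE B (Python) =====
-- def compare_proteins(proteins):
--     # Divide and conquer over the dict items: split in half, solve each half,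
--     # merge (concatenate best-match lists, keep the left argmax on ties).
--     def solve(items):
--         if len(items) <= 1:
--             if not items:
--                 return [], '', 0
--             p, lst = items[0]
--             return [(p, max(lst, key=lambda x: x[1]))], p, len(lst)
--         mid = len(items) // 2
--         bm_l, p_l, n_l = solve(items[:mid])
--         bm_r, p_r, n_r = solve(items[mid:])
--         if n_l >= n_r:
--             return bm_l + bm_r, p_l, n_l
--         return bm_l + bm_r, p_r, n_r
--     return solve(list(proteins.items()))
-- ===== Notes on version B (the rewrite author's own statement) =====
-- stated objective: alternative
-- what changed: A's single loop carrying three running accumulators (best_matches, max_protein, max_length) is replaced by a recursive divide-and-conquer over the dict items: split the item list at its midpoint, solve each half independently, and merge by concatenating the best-match lists and keeping the left half's argmax on ties (which reproduces A's first-key-wins tie-breaking).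
import Mathlib
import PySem

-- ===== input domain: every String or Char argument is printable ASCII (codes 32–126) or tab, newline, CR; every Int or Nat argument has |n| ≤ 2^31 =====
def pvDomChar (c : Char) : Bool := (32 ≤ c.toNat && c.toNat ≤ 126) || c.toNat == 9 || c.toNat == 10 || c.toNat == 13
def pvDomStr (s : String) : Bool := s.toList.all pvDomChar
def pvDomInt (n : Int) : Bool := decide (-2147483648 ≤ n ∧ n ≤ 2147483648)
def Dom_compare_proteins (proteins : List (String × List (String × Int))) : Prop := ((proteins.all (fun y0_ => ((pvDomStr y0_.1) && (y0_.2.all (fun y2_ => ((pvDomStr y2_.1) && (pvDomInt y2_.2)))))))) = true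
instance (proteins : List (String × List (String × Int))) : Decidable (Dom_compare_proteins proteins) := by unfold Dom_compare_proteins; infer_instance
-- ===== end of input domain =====

-- B replaces A's single accumulating loop by a divide-and-conquer over the dict items
-- (split in half, solve halves, merge keeping the left argmax on ties); objective: alternative.

-- ===== PORT A =====
-- One pass over the dict keys, maintaining best_matches / max_protein / max_length.
def compare_proteins (proteins : List (String × List (String × Int))) :
    (List (String × (String × Int))) × String × Int :=
  let d := PySem.Dict.ofList proteins
  (d.keys).foldl
    (fun (acc : (List (String × (String × Int))) × String × Int) protein =>
      -- res = max(proteins[protein], key=lambda x: x[1]); Python raises ValueError on an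
      -- empty list (excluded by Pre_), so the .getD default is never reached under Pre_.
      let res := (PySem.List.max? (d.getD protein []) (fun x => x.2)).getD ("", 0)
      let best_matches := acc.1 ++ [(protein, res)]
      let length : Int := (d.getD protein []).length
      if acc.2.2 < length then (best_matches, protein, length)
      else (best_matches, acc.2.1, acc.2.2))
    ([], "", 0)

-- ===== PORT B =====
-- solve(items): base case |items| <= 1, else split at len//2, recurse, merge.
def solveB (items : List (String × List (String × Int))) :
    (List (String × (String × Int))) × String × Int :=
  if _h : items.length ≤ 1 then
    match items with
    | [] => ([], "", 0)
    | (p, lst) :: _ =>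
        ([(p, (PySem.List.max? lst (fun x => x.2)).getD ("", 0))], p, (lst.length : Int))
  else
    let mid : Int := PySem.Int.floordiv (items.length : Int) 2
    let L := solveB (PySem.List.slice items none (some mid))
    let R := solveB (PySem.List.slice items (some mid) none)
    if L.2.2 ≥ R.2.2 then (L.1 ++ R.1, L.2.1, L.2.2)
    else (L.1 ++ R.1, R.2.1, R.2.2)
termination_by items.length
decreasing_by
  · have hmid : PySem.Int.floordiv (items.length : Int) 2 = ((items.length / 2 : Nat) : Int) := by
      exact_mod_cast PySem.Int.floordiv_natCast items.length 2
    rw [hmid, PySem.List.slice_to_natCast]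
    simp only [List.length_take]
    omega
  · have hmid : PySem.Int.floordiv (items.length : Int) 2 = ((items.length / 2 : Nat) : Int) := by
      exact_mod_cast PySem.Int.floordiv_natCast items.length 2
    rw [hmid, PySem.List.slice_from_natCast]
    simp only [List.length_drop]
    omega

def compare_proteins_alt (proteins : List (String × List (String × Int))) :
    (List (String × (String × Int))) × String × Int :=
  solveB (PySem.Dict.ofList proteins).items

-- ===== PRECONDITION & SPEC =====
-- Pre_ excludes exactly the inputs on which Python A raises ValueError:
-- a dict with some empty protein list (max() over an empty sequence; B raises there too).
def Pre_compare_proteins (proteins : List (String × List (String × Int))) : Prop :=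
  ∀ kv ∈ (PySem.Dict.ofList proteins).items, kv.2 ≠ []
instance (proteins : List (String × List (String × Int))) : Decidable (Pre_compare_proteins proteins) := by unfold Pre_compare_proteins; infer_instance

def pvWitness_compare_proteins : (List (String × List (String × Int))) :=
  [("a", [("x", 1), ("y", 3)]), ("b", [("z", 2)])]

def Spec_compare_proteins (proteins : List (String × List (String × Int))) (out : (List (String × (String × Int))) × String × Int) : Prop := out = compare_proteins_alt proteins
instance (proteins : List (String × List (String × Int))) (out : (List (String × (String × Int))) × String × Int) : Decidable (Spec_compare_proteins proteins out) := by unfold Spec_compare_proteins; infer_instance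

-- ===== CLAIM (what is proved, stated in full; the proofs are below) =====
def Claim_equal_compare_proteins : Prop := ∀ (proteins : List (String × List (String × Int))), Dom_compare_proteins proteins → Pre_compare_proteins proteins → Spec_compare_proteins proteins (compare_proteins proteins)

-- ===== LEMMAS AND PROOFS =====

-- The running-max step is associative in its accumulator.
theorem step_assoc {α : Type} (k : α → Int) (m q p : α) :
    (fun m x => if k m < k x then x else m) ((fun m x => if k m < k x then x else m) m q) p
      = (fun m x => if k m < k x then x else m) m ((fun m x => if k m < k x then x else m) q p) := by
  simp only
  split_ifs <;> first | rfl | omega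

-- Folding the running max from a shifted start.
theorem runmax_start {α : Type} (k : α → Int) :
    ∀ (t : List α) (q m : α),
      t.foldl (fun m x => if k m < k x then x else m) (if k m < k q then q else m)
        = (let f := t.foldl (fun m x => if k m < k x then x else m) q;
           if k m < k f then f else m) := by
  intro t
  induction t with
  | nil => intro q m; rfl
  | cons p s ih =>
      intro q m
      simp only [List.foldl_cons]
      rw [show (if k (if k m < k q then q else m) < k p then p else if k m < k q then q else m)
            = (if k m < k (if k q < k p then p else q) then (if k q < k p then p else q) else m)
          from step_assoc k m q p]
      exact ih (if k q < k p then p else q) m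

-- The first-max of an appended nonempty list combines the halves' first-maxes (left wins ties).
theorem runmax_append {α : Type} (k : α → Int) (t t' : List α) (q q' : α) :
    (t ++ q' :: t').foldl (fun m x => if k m < k x then x else m) q
      = (let a := t.foldl (fun m x => if k m < k x then x else m) q;
         let b := t'.foldl (fun m x => if k m < k x then x else m) q';
         if k a < k b then b else a) := by
  rw [List.foldl_append, List.foldl_cons]
  exact runmax_start k t' q' (t.foldl (fun m x => if k m < k x then x else m) q)

-- A's fold splits into the best_matches part and the running argmax part.
theorem foldA_split (bm : String × List (String × Int) → String × Int)
    (k : String × List (String × Int) → Int) :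
    ∀ (ps : List (String × List (String × Int)))
      (acc : (List (String × (String × Int))) × String × Int),
      ps.foldl (fun acc p =>
          let best_matches := acc.1 ++ [(p.1, bm p)]
          if acc.2.2 < k p then (best_matches, p.1, k p)
          else (best_matches, acc.2.1, acc.2.2)) acc
        = (acc.1 ++ ps.map (fun p => (p.1, bm p)),
           ps.foldl (fun (m : String × Int) p => if m.2 < k p then (p.1, k p) else m) acc.2) := by
  intro ps
  induction ps with
  | nil => intro acc; simp
  | cons p t ih =>
      intro acc
      simp only [List.foldl_cons, List.map_cons]
      by_cases h : acc.2.2 < k p <;> simp [h, ih]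

-- The running (name, length) argmax started at a real element mirrors the element argmax.
theorem foldA_argmax (k : String × List (String × Int) → Int) :
    ∀ (ps : List (String × List (String × Int))) (q : String × List (String × Int)),
      ps.foldl (fun (m : String × Int) p => if m.2 < k p then (p.1, k p) else m) (q.1, k q)
        = (let r := ps.foldl (fun m p => if k m < k p then p else m) q; (r.1, k r)) := by
  intro ps
  induction ps with
  | nil => intro q; rfl
  | cons p t ih =>
      intro q
      simp only [List.foldl_cons]
      by_cases h : k q < k p <;> simp [h, ih]

-- solveB on a nonempty list is (per-item best matches, first-max by list length).
theorem solveB_spec :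
    ∀ (q : String × List (String × Int)) (t : List (String × List (String × Int))),
      solveB (q :: t)
        = ((q :: t).map (fun p => (p.1, (PySem.List.max? p.2 (fun x => x.2)).getD ("", 0))),
           (let r := t.foldl
              (fun m p => if (m.2.length : Int) < (p.2.length : Int) then p else m) q;
            (r.1, (r.2.length : Int)))) := by
  suffices H : ∀ (n : Nat) (q : String × List (String × Int))
      (t : List (String × List (String × Int))), t.length ≤ n →
      solveB (q :: t)
        = ((q :: t).map (fun p => (p.1, (PySem.List.max? p.2 (fun x => x.2)).getD ("", 0))),
           (let r := t.foldl
              (fun m p => if (m.2.length : Int) < (p.2.length : Int) then p else m) q;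
            (r.1, (r.2.length : Int)))) by
    intro q t; exact H t.length q t le_rfl
  intro n
  induction n with
  | zero =>
      intro q t ht
      obtain rfl : t = [] := List.eq_nil_of_length_eq_zero (Nat.le_zero.mp ht)
      rw [solveB]; rfl
  | succ n ih =>
      intro q t ht
      by_cases h1 : (q :: t).length ≤ 1
      · obtain rfl : t = [] := by
          cases t with
          | nil => rfl
          | cons a s => simp at h1
        rw [solveB]; rfl
      · rw [solveB, dif_neg h1]
        have hlc : (q :: t).length = t.length + 1 := rfl
        have hmid : PySem.Int.floordiv ((q :: t).length : Int) 2
            = (((q :: t).length / 2 : Nat) : Int) := by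
          exact_mod_cast PySem.Int.floordiv_natCast (q :: t).length 2
        simp only [hmid, PySem.List.slice_to_natCast, PySem.List.slice_from_natCast, ge_iff_le]
        have hlen : 2 ≤ (q :: t).length := by omega
        set m : Nat := (q :: t).length / 2 with hm
        clear_value m
        have hm1 : 1 ≤ m := by omega
        have hmlt : m < (q :: t).length := by omega
        -- the left half is q :: t.take (m-1), the right half is a nonempty suffix of t
        have htake : (q :: t).take m = q :: t.take (m - 1) := by
          cases m with
          | zero => omega
          | succ k => simp
        have hdropq : (q :: t).drop m = t.drop (m - 1 + 1 - 1) := by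
          cases m with
          | zero => omega
          | succ k => simp
        have hdlen : 1 ≤ ((q :: t).drop m).length := by
          simp only [List.length_drop]; omega
        obtain ⟨q', t', hdrop⟩ : ∃ q' t', (q :: t).drop m = q' :: t' := by
          cases hcase : (q :: t).drop m with
          | nil => rw [hcase] at hdlen; simp at hdlen
          | cons a s => exact ⟨a, s, rfl⟩
        have hsplit : t = t.take (m - 1) ++ q' :: t' := by
          have := List.take_append_drop m (q :: t)
          rw [htake, hdrop] at this
          exact (List.cons_inj_right q).mp this.symm
        rw [htake, hdrop,
            ih q (t.take (m - 1)) (by simp only [List.length_take]; omega),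
            ih q' t' (by
              have : t'.length = (q :: t).length - m - 1 := by
                have := congrArg List.length hdrop
                simp only [List.length_drop, List.length_cons] at this
                omega
              omega)]
        simp only
        conv_rhs => rw [hsplit]
        rw [show (t.take (m - 1) ++ q' :: t').foldl
              (fun m p => if ((m.2.length : Int)) < ((p.2.length : Int)) then p else m) q
            = _ from runmax_append (fun p => ((p.2.length : Int))) (t.take (m - 1)) t' q q']
        simp only [List.map_append, List.map_cons]
        set a := (t.take (m - 1)).foldl
          (fun m p => if ((m.2.length : Int)) < ((p.2.length : Int)) then p else m) q
        set b := t'.foldl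
          (fun m p => if ((m.2.length : Int)) < ((p.2.length : Int)) then p else m) q'
        by_cases hab : ((b.2.length : Int)) ≤ ((a.2.length : Int))
        · rw [if_pos hab, if_neg (by omega)]
          rfl
        · rw [if_neg hab, if_pos (by omega)]
          rfl

-- ===== VERDICT (by name: the statement is the Claim_ definition above) =====
theorem compare_proteins_spec : Claim_equal_compare_proteins := by
  intro proteins _hdom hpre
  unfold Spec_compare_proteins compare_proteins compare_proteins_alt
  set d := PySem.Dict.ofList proteins with hd
  have hnd : d.keys.Nodup := PySem.Dict.nodup_keys_ofList proteins
  have hget : ∀ p ∈ d.items, d.getD p.1 [] = p.2 := by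
    intro p hp
    exact PySem.Dict.getD_of_mem_items d hp hnd []
  have hpre' : ∀ p ∈ d.items, p.2 ≠ [] := by
    unfold Pre_compare_proteins at hpre
    rw [← hd] at hpre
    exact hpre
  have hkeys : d.keys = d.items.map Prod.fst := rfl
  simp only [hkeys, List.foldl_map]
  cases hi : d.items with
  | nil => rw [solveB]; rfl
  | cons q t =>
      -- replace the dict lookups by the items themselves
      have hbody : (q :: t).foldl
          (fun (acc : (List (String × (String × Int))) × String × Int) p =>
            if acc.2.2 < ((d.getD p.1 []).length : Int) then
              (acc.1 ++ [(p.1, (PySem.List.max? (d.getD p.1 []) (fun x => x.2)).getD ("", 0))],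
               p.1, ((d.getD p.1 []).length : Int))
            else
              (acc.1 ++ [(p.1, (PySem.List.max? (d.getD p.1 []) (fun x => x.2)).getD ("", 0))],
               acc.2.1, acc.2.2)) ([], "", 0)
        = (q :: t).foldl
          (fun (acc : (List (String × (String × Int))) × String × Int) p =>
            if acc.2.2 < ((p.2.length : Int)) then
              (acc.1 ++ [(p.1, (PySem.List.max? p.2 (fun x => x.2)).getD ("", 0))], p.1, ((p.2.length : Int)))
            else
              (acc.1 ++ [(p.1, (PySem.List.max? p.2 (fun x => x.2)).getD ("", 0))], acc.2.1, acc.2.2))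
          ([], "", 0) := by
        refine PySem.List.foldl_congr_mem _ _ _ _ ?_
        intro acc p hp
        rw [hget p (hi.symm ▸ hp)]
      rw [hbody, foldA_split
            (fun p => (PySem.List.max? p.2 (fun x => x.2)).getD ("", 0))
            (fun p => ((p.2.length : Int))) (q :: t) ([], "", 0)]
      have hq : q ∈ d.items := by rw [hi]; exact List.mem_cons_self
      have hkq : (0 : Int) < ((q.2.length : Int)) := by
        exact_mod_cast List.length_pos_iff.mpr (hpre' q hq)
      rw [solveB_spec q t]
      refine Prod.ext (by simp) ?_
      simp only [List.foldl_cons, if_pos hkq]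
      exact foldA_argmax (fun p => ((p.2.length : Int))) t q
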